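-- pv_equiv track=rewrite | github.com/Debabrata7719/DataCrew_AI | src/memory_system.py | _get_important_messages
-- ===== SOURCE A (Python) =====
-- from typing import List, Dict, Optional
--
-- def _get_important_messages(messages: List[Dict]) -> List[Dict]:
--     """
--     Extract important messages (email sends, document creation, questions).
--
--     Args:
--         messages: List of messages to filter
--
--     Returns:
--         List of important messages
--     """
--     important = []
--     keywords = ["email", "send", "create", "document", "attach", "report", "?"]
--
--     for msg in messages:
--         content_lower = msg["content"].lower()
--         if any(keyword in content_lower for keyword in keywords):
--             important.append(msg)
--
--     return important[-10:]  # Return last 10 important messages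
-- ===== SOURCE B (Python) =====
-- from typing import List, Dict
--
-- def _get_important_messages(messages: List[Dict]) -> List[Dict]:
--     """Scan from the end and stop as soon as 10 important messages are found."""
--     keywords = ["email", "send", "create", "document", "attach", "report", "?"]
--     picked = []
--     for msg in reversed(messages):
--         content_lower = msg["content"].lower()
--         if any(keyword in content_lower for keyword in keywords):
--             picked.append(msg)
--             if len(picked) == 10:
--                 break
--     return list(reversed(picked))
-- ===== Notes on version B (the rewrite author's own statement) =====
-- stated objective: faster
-- what changed: B scans the messages from the end, collecting matches into a bounded buffer and stopping as soon as 10 are found, then reverses the buffer, instead of filtering the whole list and slicing its last 10.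
import Mathlib
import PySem

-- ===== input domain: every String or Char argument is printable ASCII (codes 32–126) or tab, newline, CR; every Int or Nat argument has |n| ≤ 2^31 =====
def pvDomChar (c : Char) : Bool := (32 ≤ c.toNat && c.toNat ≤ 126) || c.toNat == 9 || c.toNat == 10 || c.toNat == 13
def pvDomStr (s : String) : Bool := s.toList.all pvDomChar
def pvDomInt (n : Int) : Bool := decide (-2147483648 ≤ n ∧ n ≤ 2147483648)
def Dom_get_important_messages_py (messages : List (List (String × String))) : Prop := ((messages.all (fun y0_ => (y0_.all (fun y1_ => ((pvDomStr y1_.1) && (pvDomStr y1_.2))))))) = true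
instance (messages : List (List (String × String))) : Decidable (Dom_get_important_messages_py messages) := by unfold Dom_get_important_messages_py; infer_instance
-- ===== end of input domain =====

-- B changes the traversal: reverse scan with an early stop at 10 matches, instead of filtering everything and slicing the last 10 (objective: faster on match-dense tails).

-- the keyword list shared by both Pythons
def pvKeywords : List String := ["email", "send", "create", "document", "attach", "report", "?"]

-- 'any(keyword in msg["content"].lower() for keyword in keywords)' — identical expression in both Pythons
-- (msg["content"] raises KeyError when absent; Pre_ excludes that, so getD's default is never reached inside Pre_)
def pvImportant (msg : List (String × String)) : Bool :=
  let contentLower := PySem.Str.lower ((PySem.Dict.ofList msg).getD "content" "")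
  pvKeywords.any (fun keyword => PySem.Str.isIn keyword contentLower)

-- ===== PORT A =====
-- A: one forward pass appending every important message, then important[-10:]
def get_important_messages_py (messages : List (List (String × String))) : List (List (String × String)) :=
  let important := messages.foldl (fun acc msg => if pvImportant msg then acc ++ [msg] else acc) []
  PySem.List.slice important (some (-10)) none

-- ===== PORT B =====
-- B's loop: 'for msg in reversed(messages): … append; if len == 10: break'
def pvAltGo : List (List (String × String)) → List (List (String × String)) → List (List (String × String))
  | [], picked => picked
  | msg :: rest, picked =>
    if pvImportant msg then
      let picked' := picked ++ [msg]
      if picked'.length == 10 then picked' else pvAltGo rest picked'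
    else pvAltGo rest picked

def get_important_messages_py_alt (messages : List (List (String × String))) : List (List (String × String)) :=
  (pvAltGo messages.reverse []).reverse

-- ===== PRECONDITION & SPEC =====
-- Pre_ excludes exactly the inputs on which Python A raises KeyError: a message without a "content" key (B raises there too).
def Pre_get_important_messages_py (messages : List (List (String × String))) : Prop :=
  (messages.all (fun msg => (PySem.Dict.ofList msg).contains "content")) = true
instance (messages : List (List (String × String))) : Decidable (Pre_get_important_messages_py messages) := by unfold Pre_get_important_messages_py; infer_instance
def pvWitness_get_important_messages_py : (List (List (String × String))) :=
  [[("content", "please send the report")], [("content", "hello")]]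

def Spec_get_important_messages_py (messages : List (List (String × String))) (out : List (List (String × String))) : Prop := out = get_important_messages_py_alt messages
instance (messages : List (List (String × String))) (out : List (List (String × String))) : Decidable (Spec_get_important_messages_py messages out) := by unfold Spec_get_important_messages_py; infer_instance

-- ===== CLAIM (what is proved, stated in full; the proofs are below) =====
def Claim_equal_get_important_messages_py : Prop := ∀ (messages : List (List (String × String))), Dom_get_important_messages_py messages → Pre_get_important_messages_py messages → Spec_get_important_messages_py messages (get_important_messages_py messages)

-- ===== LEMMAS AND PROOFS =====

-- B's loop collects 'picked' plus the first (10 - |picked|) important messages of the remaining suffix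
lemma pvAltGo_eq (l picked : List (List (String × String))) (h : picked.length < 10) :
    pvAltGo l picked = picked ++ (l.filter pvImportant).take (10 - picked.length) := by
  induction l generalizing picked with
  | nil => simp [pvAltGo]
  | cons msg rest ih =>
    by_cases hm : pvImportant msg
    · simp only [pvAltGo, hm, if_true, List.filter_cons_of_pos hm]
      by_cases hlen : (picked ++ [msg]).length = 10
      · have hbe : (((picked ++ [msg]).length == 10) = true) := by
          rw [beq_iff_eq]; exact hlen
        have h1 : 10 - picked.length = 1 := by simp at hlen; omega
        rw [hbe]
        simp [h1]
      · have hbe : (((picked ++ [msg]).length == 10) = false) := by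
          rw [beq_eq_false_iff_ne]; exact hlen
        have hlt : (picked ++ [msg]).length < 10 := by simp at hlen ⊢; omega
        rw [hbe]
        simp only [if_false, Bool.false_eq_true]
        rw [ih _ hlt]
        have h10 : 10 - picked.length = (10 - (picked ++ [msg]).length) + 1 := by
          simp; omega
        simp [h10, List.take_succ_cons]
    · simp only [pvAltGo]
      rw [if_neg hm, List.filter_cons_of_neg (by simpa using hm)]
      exact ih picked h

-- ===== VERDICT (by name: the statement is the Claim_ definition above) =====
theorem get_important_messages_py_spec : Claim_equal_get_important_messages_py := by
  intro messages _ _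
  show get_important_messages_py messages = get_important_messages_py_alt messages
  unfold get_important_messages_py get_important_messages_py_alt
  rw [PySem.List.foldl_append_if_eq_filter, List.nil_append,
      PySem.List.slice_from_neg_ofNat _ 10 (by omega),
      pvAltGo_eq _ [] (by simp)]
  simp [List.filter_reverse, List.take_reverse]
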